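-- pv_equiv track=rewrite | github.com/Ja1Denis/Kronos | src/modules/oracle.py | extract_section_title
-- ===== SOURCE A (Python) =====
-- def extract_section_title(content: str) -> str:
--     """
--     Pronalazi najvjerojatniji naslov sekcije iz sadržaja chunka.
--     """
--     if not content or not isinstance(content, str):
--         return "Untitled Section"
--
--     lines = content.split('\n')
--     # 1. Traži markdown headere (#, ##, ###)
--     for line in lines:
--         line = line.strip()
--         if line.startswith('#'):
--             # Ukloni sve # i razmake na početku
--             title = line.lstrip('#').strip()
--             if title: return title
--
--     # 2. Fallback: Prva ne-prazna linija (ograničena na 60 znakova)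
--     for line in lines:
--         line = line.strip()
--         if line:
--             if len(line) > 60:
--                 return line[:57] + "..."
--             return line
--
--     return "Untitled Section"
-- ===== SOURCE B (Python) =====
-- def extract_section_title(content: str) -> str:
--     """Single pass over the lines, tracking the first header and first non-empty line."""
--     if not content or not isinstance(content, str):
--         return "Untitled Section"
--
--     header = None
--     first_nonempty = None
--     for raw in content.split('\n'):
--         line = raw.strip()
--         if header is None and line.startswith('#'):
--             t = line.lstrip('#').strip()
--             if t:
--                 header = t
--         if first_nonempty is None and line:
--             first_nonempty = line
--
--     if header is not None:
--         return header
--     if first_nonempty is not None: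
--         if len(first_nonempty) > 60:
--             return first_nonempty[:57] + "..."
--         return first_nonempty
--     return "Untitled Section"
-- ===== Notes on version B (the rewrite author's own statement) =====
-- stated objective: alternative
-- what changed: Replaced A's two sequential scans of the line list (headers first, then first non-empty line) by a single pass maintaining two accumulators (first valid header, first non-empty stripped line), with the truncation applied after the loop.
import Mathlib
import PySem

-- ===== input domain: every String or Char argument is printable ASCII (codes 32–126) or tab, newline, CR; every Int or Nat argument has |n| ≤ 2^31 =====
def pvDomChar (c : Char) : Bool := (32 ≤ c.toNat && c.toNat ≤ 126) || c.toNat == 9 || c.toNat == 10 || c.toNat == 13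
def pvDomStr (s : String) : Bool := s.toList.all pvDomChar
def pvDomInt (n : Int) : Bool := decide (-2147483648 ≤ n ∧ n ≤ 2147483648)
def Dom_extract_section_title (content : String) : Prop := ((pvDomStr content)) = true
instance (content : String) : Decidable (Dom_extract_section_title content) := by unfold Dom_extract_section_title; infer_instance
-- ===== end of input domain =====

-- B replaces A's two sequential scans of the lines by one pass with two accumulators (alternative decomposition, same cost).

-- ===== PORT A =====
-- first loop of A: find the first '#' line whose lstrip('#').strip() title is non-empty
-- (lstrip('#') is ported exactly as dropWhile (· == '#'): drop leading '#' characters)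
def pvFindHeader : List (List Char) → Option (List Char)
  | [] => none
  | l :: rest =>
      let line := PySem.Chars.strip l
      if PySem.Chars.startswith line ['#'] then
        let title := PySem.Chars.strip (line.dropWhile (· == '#'))
        if title ≠ [] then some title else pvFindHeader rest
      else pvFindHeader rest

-- second loop of A: first non-empty stripped line, truncated at 60 characters
def pvFirstNonempty : List (List Char) → Option (List Char)
  | [] => none
  | l :: rest =>
      let line := PySem.Chars.strip l
      if line ≠ [] then
        some (if 60 < PySem.Chars.len line then line.take 57 ++ "...".toList else line)
      else pvFirstNonempty rest

def extract_section_title (content : String) : String :=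
  if content = "" then "Untitled Section"
  else
    let lines := PySem.Chars.splitOn content.toList ['\n']
    match pvFindHeader lines with
    | some t => String.ofList t
    | none =>
      match pvFirstNonempty lines with
      | some t => String.ofList t
      | none => "Untitled Section"

-- ===== PORT B =====
-- single pass maintaining (header, first_nonempty)
def pvScan : List (List Char) → Option (List Char) → Option (List Char) →
    Option (List Char) × Option (List Char)
  | [], h, f => (h, f)
  | raw :: rest, h, f =>
      let line := PySem.Chars.strip raw
      let h' := if h.isNone ∧ PySem.Chars.startswith line ['#'] then
                  let t := PySem.Chars.strip (line.dropWhile (· == '#'))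
                  if t ≠ [] then some t else h
                else h
      let f' := if f.isNone ∧ line ≠ [] then some line else f
      pvScan rest h' f'

def extract_section_title_alt (content : String) : String :=
  if content = "" then "Untitled Section"
  else
    match pvScan (PySem.Chars.splitOn content.toList ['\n']) none none with
    | (some t, _) => String.ofList t
    | (none, some line) =>
        if 60 < PySem.Chars.len line then String.ofList (line.take 57 ++ "...".toList)
        else String.ofList line
    | (none, none) => "Untitled Section"

-- ===== PRECONDITION & SPEC =====
def Spec_extract_section_title (content : String) (out : String) : Prop := out = extract_section_title_alt content
instance (content : String) (out : String) : Decidable (Spec_extract_section_title content out) := by unfold Spec_extract_section_title; infer_instance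

-- ===== CLAIM (what is proved, stated in full; the proofs are below) =====
def Claim_equal_extract_section_title : Prop := ∀ (content : String), Dom_extract_section_title content → Spec_extract_section_title content (extract_section_title content)

-- ===== LEMMAS AND PROOFS =====

-- B's first_nonempty accumulator holds the raw (untruncated) first non-empty stripped line
def pvFirstRaw : List (List Char) → Option (List Char)
  | [] => none
  | l :: rest =>
      let line := PySem.Chars.strip l
      if line ≠ [] then some line else pvFirstRaw rest

lemma pvScan_eq (lines : List (List Char)) :
    ∀ h f, pvScan lines h f = (h.orElse (fun _ => pvFindHeader lines),
                               f.orElse (fun _ => pvFirstRaw lines)) := by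
  induction lines with
  | nil => intro h f; cases h <;> cases f <;> simp [pvScan, pvFindHeader, pvFirstRaw, Option.orElse]
  | cons l rest ih =>
      intro h f
      cases h <;> cases f <;>
        simp only [pvScan, pvFindHeader, pvFirstRaw, Option.isNone] <;>
        split_ifs <;>
        simp_all [Option.orElse]

lemma pvFirstNonempty_eq (lines : List (List Char)) :
    pvFirstNonempty lines =
      (pvFirstRaw lines).map
        (fun line => if 60 < PySem.Chars.len line then line.take 57 ++ "...".toList else line) := by
  induction lines with
  | nil => simp [pvFirstNonempty, pvFirstRaw]
  | cons l rest ih =>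
      simp only [pvFirstNonempty, pvFirstRaw]
      split_ifs <;> simp_all [PySem.Chars.len_eq]

-- ===== VERDICT (by name: the statement is the Claim_ definition above) =====
theorem extract_section_title_spec : Claim_equal_extract_section_title := by
  intro content _
  unfold Spec_extract_section_title extract_section_title extract_section_title_alt
  by_cases hc : content = ""
  · simp [hc]
  · simp only [hc, if_false]
    rw [pvScan_eq]
    cases hH : pvFindHeader (PySem.Chars.splitOn content.toList ['\n']) with
    | some t => simp [Option.orElse]
    | none =>
        rw [pvFirstNonempty_eq]
        cases hF : pvFirstRaw (PySem.Chars.splitOn content.toList ['\n']) with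
        | some line => simp [Option.orElse]; split_ifs <;> simp [String.ofList_append]
        | none => simp [Option.orElse]
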